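-- pv_equiv track=rewrite | github.com/asamnt/python-dsa | searching/searchInInfiteArray.py | search_in_infinite_array
-- ===== SOURCE A (Python) =====
-- def search_in_infinite_array(arr, target):
--     """
--     Search for a target element in an infinite-sized array.
--
--     Approach:
--     1. Find the range where target might exist using exponential jumps
--     2. Apply binary search on that range
--
--     Time Complexity: O(log n) where n is the position of target
--     Space Complexity: O(1)
--     """
--
--     # Step 1: Find the range using exponential search
--     if arr[0] == target:
--         return 0
--
--     # Find range [left, right] where target exists
--     left = 0
--     right = 1
--
--     while arr[right] < target:
--         left = right
--         right *= 2
--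
--     # Step 2: Binary search in the found range
--     return binary_search(arr, target, left, right)
--
-- def binary_search(arr, target, left, right):
--     """Binary search in the given range."""
--     while left <= right:
--         mid = left + (right - left) // 2
--
--         if arr[mid] == target:
--             return mid
--         elif arr[mid] < target:
--             left = mid + 1
--         else:
--             right = mid - 1
--
--     return -1  # Element not found
-- ===== SOURCE B (Python) =====
-- def search_in_infinite_array(arr, target):
--     """Exponential bound found by a recursive doubling helper (the lower end of
--     the range is recovered as r // 2 instead of being threaded along), then a
--     recursive binary search on [r // 2, r]."""
--     if arr[0] == target:
--         return 0
--
--     def bound(r):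
--         return r if arr[r] >= target else bound(r * 2)
--
--     def bs(lo, hi):
--         if hi < lo:
--             return -1
--         mid = (lo + hi) // 2
--         if arr[mid] < target:
--             return bs(mid + 1, hi)
--         if arr[mid] > target:
--             return bs(lo, mid - 1)
--         return mid
--
--     r = bound(1)
--     return bs(r // 2, r)
-- ===== Notes on version B (the rewrite author's own statement) =====
-- stated objective: alternative
-- what changed: The iterative doubling loop and iterative binary search are replaced by two recursive helpers; the left end of the range is no longer threaded through the loop but recomputed as r // 2, and the binary search recurses on sub-intervals with mid = (lo + hi) // 2 and the comparisons in a different order.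
import Mathlib
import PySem

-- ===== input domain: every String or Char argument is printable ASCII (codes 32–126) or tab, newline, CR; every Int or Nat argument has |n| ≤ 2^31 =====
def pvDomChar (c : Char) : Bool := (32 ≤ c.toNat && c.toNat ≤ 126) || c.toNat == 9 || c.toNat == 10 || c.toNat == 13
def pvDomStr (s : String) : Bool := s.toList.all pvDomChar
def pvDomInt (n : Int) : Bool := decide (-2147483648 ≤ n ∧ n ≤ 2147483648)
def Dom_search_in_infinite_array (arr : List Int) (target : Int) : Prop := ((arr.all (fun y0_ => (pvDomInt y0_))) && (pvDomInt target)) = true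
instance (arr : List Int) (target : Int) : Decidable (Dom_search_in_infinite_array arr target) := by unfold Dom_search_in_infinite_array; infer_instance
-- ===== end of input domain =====

-- B replaces A's two iterative phases (doubling loop threading `left`, then an
-- iterative binary search) by recursive helpers: a doubling recursion returning
-- only the upper bound r (the lower end is recovered as r // 2), then a
-- recursive binary search with mid = (lo + hi) // 2 and reordered comparisons.
-- Both loops/recursions are ported with fuel arr.length + 2, which exceeds the
-- number of iterations either can perform before returning or hitting an
-- out-of-range index (both indices at least double / the interval halves).

-- ===== PORT A =====
-- while left <= right: … (iterative binary_search, ported as fuel recursion; mid = left + (right-left)//2)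
def pvBinSearchA (arr : List Int) (target : Int) : Nat → Int → Int → Int
  | 0, _, _ => -1  -- fuel exhausted (unreachable with the fuel the entry point supplies)
  | fuel + 1, left, right =>
    if left ≤ right then
      match PySem.List.pyGet? arr (left + PySem.Int.floordiv (right - left) 2) with
      | none => -1  -- IndexError (excluded by Pre_)
      | some v =>
        if v = target then left + PySem.Int.floordiv (right - left) 2
        else if v < target then
          pvBinSearchA arr target fuel (left + PySem.Int.floordiv (right - left) 2 + 1) right
        else
          pvBinSearchA arr target fuel left (left + PySem.Int.floordiv (right - left) 2 - 1)
    else -1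

-- while arr[right] < target: left = right; right *= 2   (then binary_search(arr, target, left, right))
def pvExpLoopA (arr : List Int) (target : Int) : Nat → Int → Int → Int
  | 0, _, _ => -1  -- fuel exhausted (unreachable with the fuel the entry point supplies)
  | fuel + 1, left, right =>
    match PySem.List.pyGet? arr right with
    | none => -1  -- IndexError (excluded by Pre_)
    | some v =>
      if v < target then pvExpLoopA arr target fuel right (right * 2)
      else pvBinSearchA arr target (arr.length + 2) left right

def search_in_infinite_array (arr : List Int) (target : Int) : Int :=
  match PySem.List.pyGet? arr 0 with
  | none => -1  -- IndexError on empty arr (excluded by Pre_)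
  | some v0 =>
    if v0 = target then 0
    else pvExpLoopA arr target (arr.length + 2) 0 1

-- ===== PORT B =====
-- def bound(r): return r if arr[r] >= target else bound(r * 2)
def pvBoundB (arr : List Int) (target : Int) : Nat → Int → Option Int
  | 0, _ => none  -- fuel exhausted (unreachable with the fuel the entry point supplies)
  | fuel + 1, r =>
    match PySem.List.pyGet? arr r with
    | none => none  -- IndexError (excluded by Pre_)
    | some v =>
      if target ≤ v then some r else pvBoundB arr target fuel (r * 2)

-- def bs(lo, hi): … (recursive binary search; mid = (lo + hi)//2)
def pvBinSearchB (arr : List Int) (target : Int) : Nat → Int → Int → Int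
  | 0, _, _ => -1  -- fuel exhausted (unreachable with the fuel the entry point supplies)
  | fuel + 1, lo, hi =>
    if hi < lo then -1
    else
      match PySem.List.pyGet? arr (PySem.Int.floordiv (lo + hi) 2) with
      | none => -1  -- IndexError (excluded by Pre_)
      | some v =>
        if v < target then pvBinSearchB arr target fuel (PySem.Int.floordiv (lo + hi) 2 + 1) hi
        else if target < v then pvBinSearchB arr target fuel lo (PySem.Int.floordiv (lo + hi) 2 - 1)
        else PySem.Int.floordiv (lo + hi) 2

def search_in_infinite_array_alt (arr : List Int) (target : Int) : Int :=
  match PySem.List.pyGet? arr 0 with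
  | none => -1  -- IndexError on empty arr (excluded by Pre_)
  | some v0 =>
    if v0 = target then 0
    else
      match pvBoundB arr target (arr.length + 2) 1 with
      | none => -1  -- IndexError (excluded by Pre_)
      | some r => pvBinSearchB arr target (arr.length + 2) (PySem.Int.floordiv r 2) r

-- ===== PRECONDITION & SPEC =====
-- Pre_ excludes exactly the inputs on which Python A raises IndexError: the empty
-- list, and inputs where every power-of-two index inside the list holds a value
-- below target (so the doubling loop runs past the end of the list).
def Pre_search_in_infinite_array (arr : List Int) (target : Int) : Prop :=
  arr ≠ [] ∧ (arr.headD 0 = target ∨ ∃ k < arr.length, 2 ^ k < arr.length ∧ target ≤ arr.getD (2 ^ k) 0)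
instance (arr : List Int) (target : Int) : Decidable (Pre_search_in_infinite_array arr target) := by
  unfold Pre_search_in_infinite_array; infer_instance

def pvWitness_search_in_infinite_array : List Int × Int := ([5, 7, 9], 9)

def Spec_search_in_infinite_array (arr : List Int) (target : Int) (out : Int) : Prop := out = search_in_infinite_array_alt arr target
instance (arr : List Int) (target : Int) (out : Int) : Decidable (Spec_search_in_infinite_array arr target out) := by unfold Spec_search_in_infinite_array; infer_instance

-- ===== CLAIM (what is proved, stated in full; the proofs are below) =====
def Claim_equal_search_in_infinite_array : Prop := ∀ (arr : List Int) (target : Int), Dom_search_in_infinite_array arr target → Pre_search_in_infinite_array arr target → Spec_search_in_infinite_array arr target (search_in_infinite_array arr target)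

-- ===== LEMMAS AND PROOFS =====

-- the two binary searches agree fuel for fuel (the midpoints coincide: lo + (hi - lo)//2 = (lo + hi)//2)
theorem pvBinSearch_eq (arr : List Int) (target : Int) :
    ∀ (fuel : Nat) (lo hi : Int),
      pvBinSearchA arr target fuel lo hi = pvBinSearchB arr target fuel lo hi := by
  intro fuel
  induction fuel with
  | zero => intro lo hi; rfl
  | succ n ih =>
    intro lo hi
    rw [pvBinSearchA, pvBinSearchB]
    by_cases hlr : lo ≤ hi
    · rw [if_pos hlr, if_neg (by omega : ¬ hi < lo)]
      have hmid : lo + PySem.Int.floordiv (hi - lo) 2 = PySem.Int.floordiv (lo + hi) 2 := by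
        rw [PySem.Int.floordiv_eq_ediv_of_pos (by omega),
            PySem.Int.floordiv_eq_ediv_of_pos (by omega)]
        omega
      rw [hmid]
      cases hget : PySem.List.pyGet? arr (PySem.Int.floordiv (lo + hi) 2) with
      | none => rfl
      | some v =>
        simp only
        rcases lt_trichotomy v target with hv | hv | hv
        · rw [if_neg (by omega : ¬ v = target), if_pos hv, if_pos hv, ih]
        · rw [if_pos hv, if_neg (by omega : ¬ v < target), if_neg (by omega : ¬ target < v)]
        · rw [if_neg (by omega : ¬ v = target), if_neg (by omega : ¬ v < target),
              if_neg (by omega : ¬ v < target), if_pos hv, ih]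
    · rw [if_neg hlr, if_pos (by omega : hi < lo)]

-- A's doubling loop, with left = right // 2, matches B's bound-then-search fuel for fuel
theorem pvExp_eq (arr : List Int) (target : Int) :
    ∀ (fuel : Nat) (r : Int), 1 ≤ r →
      pvExpLoopA arr target fuel (PySem.Int.floordiv r 2) r =
      (match pvBoundB arr target fuel r with
       | none => -1
       | some b => pvBinSearchB arr target (arr.length + 2) (PySem.Int.floordiv b 2) b) := by
  intro fuel
  induction fuel with
  | zero => intro r _; rfl
  | succ n ih =>
    intro r hr
    rw [pvExpLoopA, pvBoundB]
    cases hget : PySem.List.pyGet? arr r with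
    | none => rfl
    | some v =>
      simp only
      by_cases hv : v < target
      · rw [if_pos hv, if_neg (by omega : ¬ target ≤ v)]
        have hfd : PySem.Int.floordiv (r * 2) 2 = r := by
          rw [PySem.Int.floordiv_eq_ediv_of_pos (by omega)]; omega
        have := ih (r * 2) (by omega)
        rwa [hfd] at this
      · rw [if_neg hv, if_pos (by omega : target ≤ v), pvBinSearch_eq]

-- ===== VERDICT (by name: the statement is the Claim_ definition above) =====
theorem search_in_infinite_array_spec : Claim_equal_search_in_infinite_array := by
  intro arr target _ _
  unfold Spec_search_in_infinite_array search_in_infinite_array search_in_infinite_array_alt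
  cases hget : PySem.List.pyGet? arr 0 with
  | none => rfl
  | some v0 =>
    by_cases hv : v0 = target
    · simp [hv]
    · simp only [hv, if_false]
      have := pvExp_eq arr target (arr.length + 2) 1 (by omega)
      rwa [show PySem.Int.floordiv 1 2 = 0 from by decide] at this
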